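-- pv_equiv track=rewrite | github.com/Beniyu/basicpyprojects | osutournament.py | osufriendlyname
-- ===== SOURCE A (Python) =====
-- def osufriendlyname(name):
-- 	goodname=[]
-- 	for i in range(0,len(name)):
-- 		if name[i]==" ":
-- 			goodname.append("_")
-- 		else:
-- 			goodname.append(name[i])
-- 	return ''.join(goodname)
-- ===== SOURCE B (Python) =====
-- def osufriendlyname(name):
-- 	return "_".join(name.split(" "))
-- ===== Notes on version B (the rewrite author's own statement) =====
-- stated objective: idiomatic
-- what changed: Replaces the per-character index loop and list building with a single split on the space delimiter reassembled with underscore as the joiner (C-level str methods instead of a Python-level loop).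
import Mathlib
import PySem

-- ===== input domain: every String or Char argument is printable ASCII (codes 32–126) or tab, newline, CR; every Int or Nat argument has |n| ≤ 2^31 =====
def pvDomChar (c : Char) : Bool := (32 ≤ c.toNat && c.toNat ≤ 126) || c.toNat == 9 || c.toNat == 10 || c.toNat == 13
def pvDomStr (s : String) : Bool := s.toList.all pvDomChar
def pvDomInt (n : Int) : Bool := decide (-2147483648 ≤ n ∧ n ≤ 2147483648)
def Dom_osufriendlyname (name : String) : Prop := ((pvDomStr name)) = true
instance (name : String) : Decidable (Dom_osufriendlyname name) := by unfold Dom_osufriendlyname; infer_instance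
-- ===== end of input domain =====

-- B replaces A's per-character index loop by split-on-space + join-with-underscore (idiomatic).

-- ===== PORT A =====
def osufriendlyname (name : String) : String :=
  let cs := name.toList
  let goodname := (PySem.List.pyRange 0 (PySem.Chars.len cs) 1).foldl
    (fun (goodname : List (List Char)) i =>
      if PySem.List.pyGetD cs i ' ' == ' ' then goodname ++ [['_']]
      else goodname ++ [[PySem.List.pyGetD cs i ' ']]) []
  String.ofList (PySem.Chars.join [] goodname)

-- ===== PORT B =====
def osufriendlyname_alt (name : String) : String :=
  PySem.Str.join "_" ((PySem.Str.split? name " ").getD [])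

-- ===== PRECONDITION & SPEC =====
def Spec_osufriendlyname (name : String) (out : String) : Prop := out = osufriendlyname_alt name
instance (name : String) (out : String) : Decidable (Spec_osufriendlyname name out) := by unfold Spec_osufriendlyname; infer_instance

-- ===== CLAIM (what is proved, stated in full; the proofs are below) =====
def Claim_equal_osufriendlyname : Prop := ∀ (name : String), Dom_osufriendlyname name → Spec_osufriendlyname name (osufriendlyname name)

-- ===== LEMMAS AND PROOFS =====

/-- Reference recursion describing `splitOn` on the single-char separator `' '`. -/
def pvSplitRep : List Char → List Char → List (List Char)
  | [], cur => [cur.reverse]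
  | c :: rest, cur => if c = ' ' then cur.reverse :: pvSplitRep rest [] else pvSplitRep rest (c :: cur)

theorem pvGo_eq (fuel : Nat) (l cur : List Char) (acc : List (List Char))
    (h : l.length < fuel) :
    PySem.Chars.splitOn.go [' '] fuel l cur acc = acc.reverse ++ pvSplitRep l cur := by
  induction fuel generalizing l cur acc with
  | zero => omega
  | succ n ih =>
    cases l with
    | nil => simp [PySem.Chars.splitOn.go, pvSplitRep]
    | cons c rest =>
      by_cases hc : c = ' '
      · subst hc
        simp only [PySem.Chars.splitOn.go, List.isPrefixOf, beq_self_eq_true, Bool.true_and,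
          List.isPrefixOf_nil_left, if_pos]
        rw [ih]
        · simp [pvSplitRep]
        · simpa using Nat.lt_of_succ_lt_succ h
      · have hpre : [' '].isPrefixOf (c :: rest) = false := by
          simp [List.isPrefixOf]; intro h'; exact absurd h'.symm hc
        simp only [PySem.Chars.splitOn.go, hpre, if_neg, Bool.false_eq_true, not_false_iff]
        rw [ih]
        · simp [pvSplitRep, hc]
        · simpa using Nat.lt_of_succ_lt_succ h

theorem pvSplitOn_eq (cs : List Char) :
    PySem.Chars.splitOn cs [' '] = pvSplitRep cs [] := by
  have := pvGo_eq (cs.length + 1) cs [] [] (by omega)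
  simpa [PySem.Chars.splitOn] using this

theorem pvSplitRep_ne_nil (l cur : List Char) : pvSplitRep l cur ≠ [] := by
  induction l generalizing cur with
  | nil => simp [pvSplitRep]
  | cons c rest ih =>
    by_cases hc : c = ' ' <;> simp only [pvSplitRep, hc, if_pos, if_neg, not_false_iff]
    · simp
    · simp [hc]; exact ih _

theorem pvJoin_splitRep (l cur : List Char) :
    PySem.Chars.join ['_'] (pvSplitRep l cur)
      = cur.reverse ++ l.map (fun c => if c == ' ' then '_' else c) := by
  induction l generalizing cur with
  | nil => simp [pvSplitRep, PySem.Chars.join, List.intercalate]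
  | cons c rest ih =>
    by_cases hc : c = ' '
    · subst hc
      cases hrep : pvSplitRep rest [] with
      | nil => exact absurd hrep (pvSplitRep_ne_nil rest [])
      | cons p ps =>
        have h1 : PySem.Chars.join ['_'] (cur.reverse :: p :: ps)
            = cur.reverse ++ ['_'] ++ PySem.Chars.join ['_'] (p :: ps) := by
          simp [PySem.Chars.join, List.intercalate, List.intersperse]
        simp only [pvSplitRep, if_true, eq_self_iff_true]
        rw [hrep, h1, ← hrep, ih]
        simp
    · simp [pvSplitRep, hc, ih]

theorem pvJoin_nil_singletons' (g : Char → Char) (cs : List Char) :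
    PySem.Chars.join [] (cs.map (fun c => [g c])) = cs.map g := by
  simpa using PySem.Chars.join_nil_singletons (cs.map g)

theorem pvFoldA (cs : List Char) :
    cs.foldl (fun (acc : List (List Char)) c =>
        if c == ' ' then acc ++ [['_']] else acc ++ [[c]]) []
      = cs.map (fun c => [if c == ' ' then '_' else c]) := by
  have : ∀ (init : List (List Char)),
      cs.foldl (fun acc c => if c == ' ' then acc ++ [['_']] else acc ++ [[c]]) init
        = init ++ cs.map (fun c => [if c == ' ' then '_' else c]) := by
    induction cs with
    | nil => simp
    | cons c rest ih =>
      intro init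
      rw [List.foldl_cons, ih]
      by_cases hc : c == ' '
      · simp only [hc, if_pos]
        simp [List.append_assoc, (beq_iff_eq).mp hc]
      · have hne : ¬ c = ' ' := by simpa using hc
        simp only [hc, Bool.false_eq_true, if_neg, not_false_iff]
        simp [hne, List.append_assoc]
  simpa using this []

-- ===== VERDICT (by name: the statement is the Claim_ definition above) =====
theorem osufriendlyname_spec : Claim_equal_osufriendlyname := by
  intro name _
  unfold Spec_osufriendlyname osufriendlyname osufriendlyname_alt
  simp only [PySem.Str.split?, PySem.Str.join, PySem.Chars.split?]
  have hsep : (" ".toList.isEmpty) = false := by decide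
  simp only [hsep, Bool.false_eq_true, if_neg, not_false_iff, Option.map_some, Option.getD_some]
  simp only [PySem.Chars.len_eq]
  rw [PySem.List.foldl_pyRange_zero_pyGetD' name.toList ' '
    (fun (acc : List (List Char)) c => if c == ' ' then acc ++ [['_']] else acc ++ [[c]]) []]
  rw [pvFoldA, pvJoin_nil_singletons']
  have : (" ".toList) = [' '] := by decide
  rw [this, List.map_map]
  have hcomp : (String.toList ∘ String.ofList) = id := by
    funext l; simp
  have h2 : ("_".toList) = ['_'] := by decide
  rw [hcomp, List.map_id, pvSplitOn_eq, h2, pvJoin_splitRep]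
  simp
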